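-- pv_equiv track=rewrite | github.com/ali-dfinity/ic-cargo-to-bazel-utils | bazel.py | is_bazelized_test
-- ===== SOURCE A (Python) =====
-- def is_bazelized_test(package_name, data):
--     crate_name = package_name.replace('-', '_')
--
--     binaries_or_libs = [
--         x for x in data if x.get('rule') in ['rust_library', 'rust_binary']
--     ]
--     tests_or_suites = [
--         x for x in data if x.get('rule') in ['rust_test', 'rust_test_suite']
--     ]
--     for test in tests_or_suites:
--         test_crate = test.get('crate')
--         if test_crate is None:
--             continue
--         test_crate = test_crate.replace(':', '')
--         for bin in binaries_or_libs:
--             if test_crate == bin.get('name') and crate_name in [bin.get('name'), bin.get('crate_name')]: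
--                 return True
--
--     return False
-- ===== SOURCE B (Python) =====
-- def is_bazelized_test(package_name, data):
--     crate_name = package_name.replace('-', '_')
--     qualifying_names = {
--         x['name']
--         for x in data
--         if x.get('rule') in ('rust_library', 'rust_binary')
--         and 'name' in x
--         and crate_name in (x.get('name'), x.get('crate_name'))
--     }
--     test_crates = {
--         x['crate'].replace(':', '')
--         for x in data
--         if x.get('rule') in ('rust_test', 'rust_test_suite')
--         and x.get('crate') is not None
--     }
--     return not qualifying_names.isdisjoint(test_crates)
-- ===== Notes on version B (the rewrite author's own statement) =====
-- stated objective: simpler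
-- what changed: Replaces A's nested test-by-binary scan (with early return) by two independent set comprehensions over data (qualifying binary/library names, stripped test crate names) and a single set-disjointness check.
import Mathlib
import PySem

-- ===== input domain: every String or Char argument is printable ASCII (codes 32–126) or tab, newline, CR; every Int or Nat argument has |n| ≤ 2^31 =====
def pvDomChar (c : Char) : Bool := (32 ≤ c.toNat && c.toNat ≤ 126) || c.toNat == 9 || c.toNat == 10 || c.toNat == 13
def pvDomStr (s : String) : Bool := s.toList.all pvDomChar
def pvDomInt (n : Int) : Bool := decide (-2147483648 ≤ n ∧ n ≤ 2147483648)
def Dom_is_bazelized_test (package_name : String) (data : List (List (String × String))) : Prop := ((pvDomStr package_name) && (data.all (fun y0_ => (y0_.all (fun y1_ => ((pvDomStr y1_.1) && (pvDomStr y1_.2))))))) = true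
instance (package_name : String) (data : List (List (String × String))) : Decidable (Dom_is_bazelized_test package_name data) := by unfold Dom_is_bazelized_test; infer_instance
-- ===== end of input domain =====

-- B replaces A's nested test-by-binary scan with two set comprehensions over data
-- and a single set-disjointness check (objective: simpler).

-- ===== PORT A =====
-- x.get(k) on a row dict (association list, first match)
def isbA_get (row : List (String × String)) (k : String) : Option String :=
  (PySem.Dict.mk row).get? k

-- inner 'for bin in binaries_or_libs: … return True'
def isbA_inner (crate_name test_crate : String) (bins : List (List (String × String))) : Bool :=
  match bins with
  | [] => false
  | bin :: rest =>
    if some test_crate = isbA_get bin "name" ∧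
        (some crate_name = isbA_get bin "name" ∨ some crate_name = isbA_get bin "crate_name") then
      true
    else isbA_inner crate_name test_crate rest

-- outer 'for test in tests_or_suites: …'
def isbA_outer (crate_name : String) (bins tests : List (List (String × String))) : Bool :=
  match tests with
  | [] => false
  | t :: rest =>
    match isbA_get t "crate" with
    | none => isbA_outer crate_name bins rest
    | some tc =>
      if isbA_inner crate_name (PySem.Str.replace tc ":" "") bins then true
      else isbA_outer crate_name bins rest

def is_bazelized_test (package_name : String) (data : List (List (String × String))) : Bool :=
  let crate_name := PySem.Str.replace package_name "-" "_"
  let binaries_or_libs := data.filter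
    (fun x => isbA_get x "rule" = some "rust_library" ∨ isbA_get x "rule" = some "rust_binary")
  let tests_or_suites := data.filter
    (fun x => isbA_get x "rule" = some "rust_test" ∨ isbA_get x "rule" = some "rust_test_suite")
  isbA_outer crate_name binaries_or_libs tests_or_suites

-- ===== PORT B =====
def isbB_get (row : List (String × String)) (k : String) : Option String :=
  (PySem.Dict.mk row).get? k

def is_bazelized_test_alt (package_name : String) (data : List (List (String × String))) : Bool :=
  let crate_name := PySem.Str.replace package_name "-" "_"
  let qualifying_names : PySem.Set String := PySem.Set.ofList
    (data.filterMap (fun x =>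
      if (isbB_get x "rule" = some "rust_library" ∨ isbB_get x "rule" = some "rust_binary") ∧
          (isbB_get x "name" = some crate_name ∨ isbB_get x "crate_name" = some crate_name) then
        isbB_get x "name"
      else none))
  let test_crates : PySem.Set String := PySem.Set.ofList
    (data.filterMap (fun x =>
      if isbB_get x "rule" = some "rust_test" ∨ isbB_get x "rule" = some "rust_test_suite" then
        (isbB_get x "crate").map (fun c => PySem.Str.replace c ":" "")
      else none))
  !(PySem.Set.isdisjoint qualifying_names test_crates)

-- ===== PRECONDITION & SPEC =====
def Spec_is_bazelized_test (package_name : String) (data : List (List (String × String))) (out : Bool) : Prop := out = is_bazelized_test_alt package_name data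
instance (package_name : String) (data : List (List (String × String))) (out : Bool) : Decidable (Spec_is_bazelized_test package_name data out) := by unfold Spec_is_bazelized_test; infer_instance

-- ===== CLAIM (what is proved, stated in full; the proofs are below) =====
def Claim_equal_is_bazelized_test : Prop := ∀ (package_name : String) (data : List (List (String × String))), Dom_is_bazelized_test package_name data → Spec_is_bazelized_test package_name data (is_bazelized_test package_name data)

-- ===== LEMMAS AND PROOFS =====

theorem isbB_get_eq (r : List (String × String)) (k : String) : isbB_get r k = isbA_get r k := rfl

theorem isbA_inner_iff (crate tc : String) (bins : List (List (String × String))) :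
    isbA_inner crate tc bins = true ↔
      ∃ b ∈ bins, some tc = isbA_get b "name" ∧
        (some crate = isbA_get b "name" ∨ some crate = isbA_get b "crate_name") := by
  induction bins with
  | nil => simp [isbA_inner]
  | cons b rest ih =>
    simp only [isbA_inner]
    split_ifs with h
    · exact iff_of_true rfl ⟨b, by simp, h⟩
    · rw [ih]
      constructor
      · rintro ⟨b', hb', hc⟩; exact ⟨b', List.mem_cons_of_mem _ hb', hc⟩
      · rintro ⟨b', hb', hc⟩
        rcases List.mem_cons.mp hb' with rfl | hb'
        · exact absurd hc h
        · exact ⟨b', hb', hc⟩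

theorem isbA_outer_iff (crate : String) (bins tests : List (List (String × String))) :
    isbA_outer crate bins tests = true ↔
      ∃ t ∈ tests, ∃ tc, isbA_get t "crate" = some tc ∧
        isbA_inner crate (PySem.Str.replace tc ":" "") bins = true := by
  induction tests with
  | nil => simp [isbA_outer]
  | cons t rest ih =>
    rw [show isbA_outer crate bins (t :: rest) =
          (match isbA_get t "crate" with
            | none => isbA_outer crate bins rest
            | some tc =>
              if isbA_inner crate (PySem.Str.replace tc ":" "") bins then true
              else isbA_outer crate bins rest) from rfl]
    cases hg : isbA_get t "crate" with
    | none =>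
      show isbA_outer crate bins rest = true ↔ _
      rw [ih]
      constructor
      · rintro ⟨x, hx, hc⟩; exact ⟨x, List.mem_cons_of_mem _ hx, hc⟩
      · rintro ⟨x, hx, tc, htc, hc⟩
        rcases List.mem_cons.mp hx with rfl | hx
        · rw [hg] at htc; cases htc
        · exact ⟨x, hx, tc, htc, hc⟩
    | some tc =>
      show (if isbA_inner crate (PySem.Str.replace tc ":" "") bins then true
            else isbA_outer crate bins rest) = true ↔ _
      split_ifs with h
      · exact iff_of_true rfl ⟨t, by simp, tc, hg, h⟩
      · rw [ih]
        constructor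
        · rintro ⟨x, hx, hc⟩; exact ⟨x, List.mem_cons_of_mem _ hx, hc⟩
        · rintro ⟨x, hx, tc', htc', hc⟩
          rcases List.mem_cons.mp hx with rfl | hx
          · rw [hg] at htc'; cases htc'; exact absurd hc h
          · exact ⟨x, hx, tc', htc', hc⟩

-- the existential both programs decide
def isbExists (crate : String) (data : List (List (String × String))) : Prop :=
  ∃ t ∈ data,
    (isbA_get t "rule" = some "rust_test" ∨ isbA_get t "rule" = some "rust_test_suite") ∧
    ∃ tc, isbA_get t "crate" = some tc ∧
    ∃ b ∈ data,
      (isbA_get b "rule" = some "rust_library" ∨ isbA_get b "rule" = some "rust_binary") ∧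
      isbA_get b "name" = some (PySem.Str.replace tc ":" "") ∧
      (isbA_get b "name" = some crate ∨ isbA_get b "crate_name" = some crate)

theorem isbA_iff (pn : String) (data : List (List (String × String))) :
    is_bazelized_test pn data = true ↔ isbExists (PySem.Str.replace pn "-" "_") data := by
  unfold is_bazelized_test isbExists
  rw [isbA_outer_iff]
  constructor
  · rintro ⟨t, ht, tc, htc, hin⟩
    rw [isbA_inner_iff] at hin
    obtain ⟨b, hb, h1, h2⟩ := hin
    rw [List.mem_filter] at ht hb
    refine ⟨t, ht.1, by simpa using ht.2, tc, htc, b, hb.1, by simpa using hb.2, h1.symm, ?_⟩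
    rcases h2 with h | h
    · exact Or.inl h.symm
    · exact Or.inr h.symm
  · rintro ⟨t, ht, hrt, tc, htc, b, hb, hrb, h1, h2⟩
    refine ⟨t, List.mem_filter.mpr ⟨ht, by simpa using hrt⟩, tc, htc, ?_⟩
    rw [isbA_inner_iff]
    refine ⟨b, List.mem_filter.mpr ⟨hb, by simpa using hrb⟩, h1.symm, ?_⟩
    rcases h2 with h | h
    · exact Or.inl h.symm
    · exact Or.inr h.symm

theorem not_isdisjoint_iff {α : Type} [BEq α] [LawfulBEq α] (s t : PySem.Set α) :
    (!(PySem.Set.isdisjoint s t)) = true ↔ ∃ x ∈ s, x ∈ t := by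
  rw [Bool.not_eq_true']
  constructor
  · intro h
    by_contra hno
    push Not at hno
    have hd : PySem.Set.isdisjoint s t = true := (PySem.Set.isdisjoint_iff s t).mpr hno
    rw [hd] at h; cases h
  · rintro ⟨x, hxs, hxt⟩
    cases h : PySem.Set.isdisjoint s t with
    | false => rfl
    | true => exact absurd hxt ((PySem.Set.isdisjoint_iff s t).mp h x hxs)

theorem isbB_iff (pn : String) (data : List (List (String × String))) :
    is_bazelized_test_alt pn data = true ↔ isbExists (PySem.Str.replace pn "-" "_") data := by
  unfold is_bazelized_test_alt
  rw [not_isdisjoint_iff]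
  simp only [PySem.Set.mem_ofList, List.mem_filterMap, isbB_get_eq]
  constructor
  · rintro ⟨n, ⟨b, hb, hfb⟩, ⟨t, ht, hft⟩⟩
    split_ifs at hfb with hcb
    · split_ifs at hft with hct
      · cases hg : isbA_get t "crate" with
        | none => rw [hg] at hft; cases hft
        | some tc =>
          rw [hg] at hft
          simp only [Option.map_some] at hft
          cases hft
          exact ⟨t, ht, hct, tc, hg, b, hb, hcb.1, hfb, hcb.2⟩
  · rintro ⟨t, ht, hct, tc, hg, b, hb, hrb, h1, h2⟩
    refine ⟨PySem.Str.replace tc ":" "", ⟨b, hb, ?_⟩, ⟨t, ht, ?_⟩⟩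
    · rw [if_pos ⟨hrb, h2⟩]; exact h1
    · rw [if_pos hct, hg]; rfl

-- ===== VERDICT (by name: the statement is the Claim_ definition above) =====
theorem is_bazelized_test_spec : Claim_equal_is_bazelized_test := by
  intro pn data _
  unfold Spec_is_bazelized_test
  cases hA : is_bazelized_test pn data with
  | true => exact ((isbB_iff pn data).mpr ((isbA_iff pn data).mp hA)).symm
  | false =>
    cases hB : is_bazelized_test_alt pn data with
    | true => exact hA.symm.trans ((isbA_iff pn data).mpr ((isbB_iff pn data).mp hB))
    | false => rfl
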